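-- pv_equiv track=rewrite | github.com/sharathkumar49/learning | Python programs/LeetCodeSolutions/2282.NumberOfPeopleThatCanBeSeenInAGrid.py | canSeePeople
-- ===== SOURCE A (Python) =====
-- def canSeePeople(heights):
--     m, n = len(heights), len(heights[0])
--     res = [[0]*n for _ in range(m)]
--     for i in range(m):
--         for j in range(n):
--             for k in range(j+1, n):
--                 if heights[i][k] > heights[i][j]:
--                     res[i][j] += 1
--                     break
--             for k in range(i+1, m):
--                 if heights[k][j] > heights[i][j]:
--                     res[i][j] += 1
--                     break
--     return res
-- ===== SOURCE B (Python) =====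
-- def canSeePeople(heights):
--     # One pass from bottom-right: keep running row-suffix max and column-suffix maxima.
--     n = len(heights[0])
--     colmax = [None] * n
--     res = []
--     for row in reversed(heights):
--         rowmax = None
--         out = [0] * n
--         for j in range(n - 1, -1, -1):
--             h = row[j]
--             cnt = 0
--             if rowmax is not None and rowmax > h:
--                 cnt += 1
--             if colmax[j] is not None and colmax[j] > h:
--                 cnt += 1
--             out[j] = cnt
--             if rowmax is None or h > rowmax:
--                 rowmax = h
--             if colmax[j] is None or h > colmax[j]:
--                 colmax[j] = h
--         res.append(out)
--     res.reverse()
--     return res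
-- ===== Notes on version B (the rewrite author's own statement) =====
-- stated objective: faster
-- what changed: Instead of scanning right and down from every cell for the first taller person, B makes one bottom-right-to-top-left pass maintaining a running row-suffix maximum and per-column suffix maxima, deciding each cell by two comparisons.
import Mathlib
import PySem

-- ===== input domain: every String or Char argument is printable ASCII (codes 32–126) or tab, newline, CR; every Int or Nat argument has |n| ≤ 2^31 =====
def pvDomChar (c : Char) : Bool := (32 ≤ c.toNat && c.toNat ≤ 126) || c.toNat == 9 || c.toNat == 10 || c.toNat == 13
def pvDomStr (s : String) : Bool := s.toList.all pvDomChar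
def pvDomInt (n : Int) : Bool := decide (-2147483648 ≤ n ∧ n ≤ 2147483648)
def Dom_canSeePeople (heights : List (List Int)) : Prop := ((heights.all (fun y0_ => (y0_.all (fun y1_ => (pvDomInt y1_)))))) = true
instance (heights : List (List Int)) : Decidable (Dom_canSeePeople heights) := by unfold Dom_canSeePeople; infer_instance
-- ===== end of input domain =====

-- B replaces A's per-cell scans right/down by one bottom-right-to-top-left pass with
-- running row-suffix and column-suffix maxima (objective: faster, asymptotic).

-- ===== PORT A =====
-- 'for k in range(a,b): if p(k): res += 1; break' — returns 1 on first hit, else 0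
def pvLoopBreak (ks : List Int) (p : Int → Bool) : Int :=
  match ks with
  | [] => 0
  | k :: rest => if p k then 1 else pvLoopBreak rest p

-- indexing uses pyGetD; exact under Pre_ (all indices in range there)
def canSeePeople (heights : List (List Int)) : List (List Int) :=
  let m : Int := heights.length
  let n : Int := (PySem.List.pyGetD heights 0 []).length
  (PySem.List.pyRange 0 m 1).map (fun i =>
    (PySem.List.pyRange 0 n 1).map (fun j =>
      let hij := PySem.List.pyGetD (PySem.List.pyGetD heights i []) j 0
      pvLoopBreak (PySem.List.pyRange (j+1) n 1)
          (fun k => decide (hij < PySem.List.pyGetD (PySem.List.pyGetD heights i []) k 0))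
        + pvLoopBreak (PySem.List.pyRange (i+1) m 1)
          (fun k => decide (hij < PySem.List.pyGetD (PySem.List.pyGetD heights k []) j 0))))

-- ===== PORT B =====
-- 'if x is None or h > x: x = h' update of a running maximum (None = no one yet)
def pvOMax (h : Int) (c : Option Int) : Option Int :=
  match c with
  | none => some h
  | some r => if h > r then some h else some r

-- 'if x is not None and x > h: cnt += 1'
def pvSeesInd (o : Option Int) (h : Int) : Int :=
  match o with
  | some v => if v > h then 1 else 0
  | none => 0

-- inner loop of Source B, right to left over one row: returns (out, updated colmax, rowmax)
def pvRowPass : List Int → List (Option Int) → (List Int × List (Option Int) × Option Int)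
  | [], _ => ([], [], none)
  | h :: rest, cms =>
    let c := cms.headD none
    let (outRest, cs', rmax) := pvRowPass rest cms.tail
    ((pvSeesInd rmax h + pvSeesInd c h) :: outRest, pvOMax h c :: cs', pvOMax h rmax)

-- outer loop of Source B over rows, bottom-up: returns (res, colmax)
def pvBRows : List (List Int) → Nat → List (Option Int) → (List (List Int) × List (Option Int))
  | [], _, cms => ([], cms)
  | row :: rest, n, cms =>
    let (resRest, cms') := pvBRows rest n cms
    let (out, cms'', _) := pvRowPass (row.take n) cms'
    (out :: resRest, cms'')

def canSeePeople_alt (heights : List (List Int)) : List (List Int) :=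
  let n := (PySem.List.pyGetD heights 0 []).length
  (pvBRows heights n (List.replicate n none)).1

-- ===== PRECONDITION & SPEC =====
-- A raises IndexError on an empty grid (it reads the first row) and whenever some row
-- is shorter than the first row; Pre_ excludes exactly those inputs (B raises there too).
def Pre_canSeePeople (heights : List (List Int)) : Prop :=
  heights ≠ [] ∧ ∀ row ∈ heights, (heights.headD []).length ≤ row.length
instance (heights : List (List Int)) : Decidable (Pre_canSeePeople heights) := by
  unfold Pre_canSeePeople; infer_instance

def pvWitness_canSeePeople : List (List Int) := [[3, 1, 4], [2, 5, 0]]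

def Spec_canSeePeople (heights : List (List Int)) (out : List (List Int)) : Prop := out = canSeePeople_alt heights
instance (heights : List (List Int)) (out : List (List Int)) : Decidable (Spec_canSeePeople heights out) := by unfold Spec_canSeePeople; infer_instance

-- ===== CLAIM (what is proved, stated in full; the proofs are below) =====
def Claim_equal_canSeePeople : Prop := ∀ (heights : List (List Int)), Dom_canSeePeople heights → Pre_canSeePeople heights → Spec_canSeePeople heights (canSeePeople heights)

-- ===== LEMMAS AND PROOFS =====

-- maximum of a list as an Option, via pvOMax (the value pvRowPass tracks as rowmax)
def pvOMaxList : List Int → Option Int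
  | [] => none
  | h :: t => pvOMax h (pvOMaxList t)

-- per-column suffix maximum of a list of rows at column j
def pvColSpec (rows : List (List Int)) (j : Nat) (base : Option Int) : Option Int :=
  match rows with
  | [] => base
  | r :: rest => pvOMax (r.getD j 0) (pvColSpec rest j base)

-- pointwise colmax update, the shape of pvRowPass's second component
def pvZipUpd : List Int → List (Option Int) → List (Option Int)
  | [], _ => []
  | h :: t, cms => pvOMax h (cms.headD none) :: pvZipUpd t cms.tail

theorem pvSeesInd_pvOMax (x : Int) (o : Option Int) (h : Int) :
    pvSeesInd (pvOMax x o) h = if h < x then 1 else pvSeesInd o h := by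
  rcases o with _ | v
  · simp [pvOMax, pvSeesInd]
  · simp only [pvOMax]
    split_ifs with h1 <;> simp only [pvSeesInd] <;> split_ifs <;> omega

theorem pvRowPass_third (row : List Int) (cms : List (Option Int)) :
    (pvRowPass row cms).2.2 = pvOMaxList row := by
  induction row generalizing cms with
  | nil => rfl
  | cons h t ih => simp [pvRowPass, pvOMaxList, ih]

theorem pvRowPass_second (row : List Int) (cms : List (Option Int)) :
    (pvRowPass row cms).2.1 = pvZipUpd row cms := by
  induction row generalizing cms with
  | nil => rfl
  | cons h t ih => simp [pvRowPass, pvZipUpd, ih]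

theorem pvRowPass_len (row : List Int) (cms : List (Option Int)) :
    (pvRowPass row cms).1.length = row.length := by
  induction row generalizing cms with
  | nil => rfl
  | cons h t ih => simp [pvRowPass, ih]

theorem pvRowPass_get (row : List Int) (cms : List (Option Int)) (j : Nat) (hj : j < row.length) :
    (pvRowPass row cms).1.getD j 0
      = pvSeesInd (pvOMaxList (row.drop (j+1))) (row.getD j 0)
        + pvSeesInd (cms.getD j none) (row.getD j 0) := by
  induction row generalizing cms j with
  | nil => simp at hj
  | cons h t ih =>
    cases j with
    | zero =>
      simp [pvRowPass, pvRowPass_third]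
      cases cms <;> rfl
    | succ j =>
      have hj' : j < t.length := by simpa using hj
      simp only [pvRowPass, List.getD_cons_succ, List.drop_succ_cons]
      rw [ih cms.tail j hj']
      cases cms <;> rfl

theorem pvZipUpd_get (row : List Int) (cms : List (Option Int)) (j : Nat) (hj : j < row.length) :
    (pvZipUpd row cms).getD j none = pvOMax (row.getD j 0) (cms.getD j none) := by
  induction row generalizing cms j with
  | nil => simp at hj
  | cons h t ih =>
    cases j with
    | zero => cases cms <;> rfl
    | succ j =>
      have hj' : j < t.length := by simpa using hj
      simp only [pvZipUpd, List.getD_cons_succ]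
      rw [ih cms.tail j hj']
      cases cms <;> rfl

theorem pvBRows_len (rows : List (List Int)) (n : Nat) (cms : List (Option Int)) :
    (pvBRows rows n cms).1.length = rows.length := by
  induction rows generalizing cms with
  | nil => rfl
  | cons r rest ih => simp [pvBRows, ih]

theorem pvBRows_get (rows : List (List Int)) (n : Nat) (cms : List (Option Int))
    (i : Nat) (hi : i < rows.length) :
    (pvBRows rows n cms).1.getD i []
      = (pvRowPass ((rows.getD i []).take n) ((pvBRows (rows.drop (i+1)) n cms).2)).1 := by
  induction rows generalizing i with
  | nil => simp at hi
  | cons r rest ih =>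
    cases i with
    | zero => simp [pvBRows]
    | succ i =>
      have hi' : i < rest.length := by simpa using hi
      simpa [pvBRows, List.getD_cons_succ] using ih i hi'

theorem pvBRows_snd_get (rows : List (List Int)) (n : Nat) (cms : List (Option Int))
    (j : Nat) (hj : j < n) (hlen : ∀ r ∈ rows, n ≤ r.length)
    (hbase : cms.getD j none = none) :
    (pvBRows rows n cms).2.getD j none = pvColSpec rows j none := by
  induction rows with
  | nil => simpa [pvBRows, pvColSpec] using hbase
  | cons r rest ih =>
    have hr : n ≤ r.length := hlen r (List.mem_cons_self ..)
    have hjt : j < (r.take n).length := by simp; omega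
    simp only [pvBRows, pvColSpec]
    rw [pvRowPass_second, pvZipUpd_get _ _ j hjt,
        ih (fun x hx => hlen x (List.mem_cons_of_mem _ hx))]
    congr 1
    rw [List.getD_eq_getElem _ _ hjt, List.getElem_take,
        List.getD_eq_getElem _ _ (by omega : j < r.length)]

-- A's row scan with break = indicator that the row-suffix maximum is taller
theorem pvKeyRow (xs : List Int) (hgt : Int) (n : Nat) (hn : n ≤ xs.length) :
    ∀ a : Nat, pvLoopBreak (PySem.List.pyRange (↑a) (↑n) 1)
        (fun k => decide (hgt < PySem.List.pyGetD xs k 0))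
      = pvSeesInd (pvOMaxList ((xs.take n).drop a)) hgt := by
  intro a
  induction hfuel : n - a generalizing a with
  | zero =>
    have : (n:Int) ≤ (a:Int) := by omega
    rw [PySem.List.pyRange_one_eq_nil this]
    have : ((xs.take n).drop a) = [] := by
      apply List.drop_eq_nil_of_le; simp; omega
    simp [this, pvLoopBreak, pvOMaxList, pvSeesInd]
  | succ f ih =>
    have ha : a < n := by omega
    rw [PySem.List.pyRange_one_cons (by exact_mod_cast ha)]
    have hx : a < xs.length := by omega
    have hdrop : (xs.take n).drop a = xs[a] :: (xs.take n).drop (a+1) := by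
      rw [List.drop_eq_getElem_cons (by simp; omega)]
      congr 1
      rw [List.getElem_take]
    rw [hdrop]
    simp only [pvLoopBreak, pvOMaxList, pvSeesInd_pvOMax]
    rw [show ((a:Int) + 1) = ((a+1 : Nat) : Int) by push_cast; ring]
    rw [ih (a+1) (by omega)]
    have hidx : PySem.List.pyGetD xs (↑a) 0 = xs[a] := by
      simp [PySem.List.pyGetD_natCast, List.getElem?_eq_getElem hx]
    simp only [hidx]
    split_ifs with h1 h2 h2 <;> simp_all <;> omega

-- A's column scan with break = indicator over the rows below, column j
theorem pvKeyCol (rows : List (List Int)) (hgt : Int) (j : Nat) :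
    ∀ a : Nat, pvLoopBreak (PySem.List.pyRange (↑a) (↑rows.length) 1)
        (fun k => decide (hgt < PySem.List.pyGetD (PySem.List.pyGetD rows k []) (↑j) 0))
      = pvSeesInd (pvColSpec (rows.drop a) j none) hgt := by
  intro a
  induction hfuel : rows.length - a generalizing a with
  | zero =>
    have : ((rows.length):Int) ≤ (a:Int) := by omega
    rw [PySem.List.pyRange_one_eq_nil this]
    have : rows.drop a = [] := List.drop_eq_nil_of_le (by omega)
    simp [this, pvLoopBreak, pvColSpec, pvSeesInd]
  | succ f ih =>
    have ha : a < rows.length := by omega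
    rw [PySem.List.pyRange_one_cons (by exact_mod_cast ha)]
    have hdrop : rows.drop a = rows[a] :: rows.drop (a+1) :=
      List.drop_eq_getElem_cons ha
    rw [hdrop]
    simp only [pvLoopBreak, pvColSpec, pvSeesInd_pvOMax]
    rw [show ((a:Int) + 1) = ((a+1 : Nat) : Int) by push_cast; ring]
    rw [ih (a+1) (by omega)]
    have hidx : PySem.List.pyGetD (PySem.List.pyGetD rows (↑a) []) (↑j) 0
        = (rows[a]).getD j 0 := by
      simp [PySem.List.pyGetD_natCast, List.getElem?_eq_getElem ha]
    simp only [hidx]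
    split_ifs with h1 h2 h2 <;> simp_all <;> omega

-- ===== VERDICT (by name: the statement is the Claim_ definition above) =====
theorem canSeePeople_spec : Claim_equal_canSeePeople := by
  intro heights _ hpre
  obtain ⟨hne, hrows⟩ := hpre
  unfold Spec_canSeePeople canSeePeople canSeePeople_alt
  dsimp only
  have hhead : heights.headD [] = PySem.List.pyGetD heights 0 [] := by
    cases heights with
    | nil => simp at hne
    | cons a t => simp [PySem.List.pyGetD_zero]
  set N := (PySem.List.pyGetD heights 0 []).length with hNdef
  have hN : ∀ row ∈ heights, N ≤ row.length := by
    intro r hr; rw [hNdef, ← hhead]; exact hrows r hr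
  apply List.ext_getElem
  · simp [PySem.List.length_pyRange_one, pvBRows_len]
  · intro i h1 h2
    have hiM : i < heights.length := by simpa [pvBRows_len] using h2
    have hrowlen : N ≤ (heights[i]).length := hN _ (List.getElem_mem hiM)
    have hrowgetD : heights.getD i [] = heights[i] := List.getD_eq_getElem _ _ hiM
    rw [List.getElem_map]
    rw [show (pvBRows heights N (List.replicate N none)).1[i]'h2
          = (pvBRows heights N (List.replicate N none)).1.getD i [] from
        (List.getD_eq_getElem _ _ h2).symm]
    rw [pvBRows_get _ _ _ i hiM, hrowgetD]
    rw [PySem.List.getElem_pyRange_one]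
    apply List.ext_getElem
    · simp [PySem.List.length_pyRange_one, pvRowPass_len]; omega
    · intro j hj1 hj2
      have hjN : j < N := by
        simp [pvRowPass_len] at hj2; omega
      have hjrow : j < (heights[i]).length := by omega
      rw [List.getElem_map, PySem.List.getElem_pyRange_one]
      rw [show (pvRowPass ((heights[i]).take N)
              ((pvBRows (heights.drop (i+1)) N (List.replicate N none)).2)).1[j]'hj2
            = (pvRowPass ((heights[i]).take N)
              ((pvBRows (heights.drop (i+1)) N (List.replicate N none)).2)).1.getD j 0 from
          (List.getD_eq_getElem _ _ hj2).symm]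
      rw [pvRowPass_get _ _ j (by simp; omega)]
      simp only [zero_add]
      have hpy_i : PySem.List.pyGetD heights ((i:Int)) [] = heights[i] := by
        simp [PySem.List.pyGetD_natCast, List.getElem?_eq_getElem hiM]
      have hpy_ij : PySem.List.pyGetD (heights[i]) ((j:Int)) 0 = heights[i][j] := by
        simp [PySem.List.pyGetD_natCast, List.getElem?_eq_getElem hjrow]
      have htake_j : ((heights[i]).take N).getD j 0 = heights[i][j] := by
        rw [List.getD_eq_getElem _ _ (by simp; omega), List.getElem_take]
      have hcms : ((pvBRows (heights.drop (i+1)) N (List.replicate N none)).2).getD j none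
          = pvColSpec (heights.drop (i+1)) j none := by
        apply pvBRows_snd_get _ _ _ _ hjN
        · intro r hr; exact hN r (List.mem_of_mem_drop hr)
        · simp [List.getD]
      rw [htake_j, hcms]
      simp only [hpy_i, hpy_ij]
      rw [show ((j:Int)) + 1 = ((j+1 : Nat) : Int) by push_cast; ring]
      rw [show ((i:Int)) + 1 = ((i+1 : Nat) : Int) by push_cast; ring]
      rw [pvKeyRow (heights[i]) _ N hrowlen (j+1)]
      rw [pvKeyCol heights _ j (i+1)]
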